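-- pv_equiv track=rewrite | github.com/Davidkatom/Crosstalk | chains/chains.py | covers_all_arcs
-- ===== SOURCE A (Python) =====
-- def covers_all_arcs(chains, n, m):
--     arcs = set()
--     for chain in chains:
--         for i in range(len(chain) - 1):
--             arcs.add((chain[i], chain[i + 1]))
--             arcs.add((chain[i + 1], chain[i]))  # Add both directions to ensure undirected coverage
--
--     all_arcs = set()
--     for i in range(n):
--         for j in range(m):
--             for di, dj in [(0, 1), (1, 0), (0, -1), (-1, 0)]:  # Check all adjacent cells
--                 if 0 <= i + di < n and 0 <= j + dj < m:
--                     all_arcs.add(((i, j), (i + di, j + dj)))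
--
--     return all_arcs.issubset(arcs)
-- ===== SOURCE B (Python) =====
-- def covers_all_arcs(chains, n, m):
--     if n < 1 or m < 1:
--         return True  # empty grid: nothing to cover
--     covered = set()
--     for chain in chains:
--         for a, b in zip(chain, chain[1:]):
--             (i, j), (p, q) = a, b
--             if 0 <= i < n and 0 <= j < m and 0 <= p < n and 0 <= q < m \
--                     and abs(i - p) + abs(j - q) == 1:
--                 covered.add((a, b))
--                 covered.add((b, a))
--     return len(covered) == 2 * (n * (m - 1) + (n - 1) * m)
-- ===== Notes on version B (the rewrite author's own statement) =====
-- stated objective: faster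
-- what changed: Instead of materialising every grid adjacency arc with an O(n*m) triple loop and testing set inclusion, B makes a single pass over the chain arcs, keeps only the distinct valid grid arcs, and compares their count to the closed-form total 2*(n*(m-1)+(n-1)*m).
import Mathlib
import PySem

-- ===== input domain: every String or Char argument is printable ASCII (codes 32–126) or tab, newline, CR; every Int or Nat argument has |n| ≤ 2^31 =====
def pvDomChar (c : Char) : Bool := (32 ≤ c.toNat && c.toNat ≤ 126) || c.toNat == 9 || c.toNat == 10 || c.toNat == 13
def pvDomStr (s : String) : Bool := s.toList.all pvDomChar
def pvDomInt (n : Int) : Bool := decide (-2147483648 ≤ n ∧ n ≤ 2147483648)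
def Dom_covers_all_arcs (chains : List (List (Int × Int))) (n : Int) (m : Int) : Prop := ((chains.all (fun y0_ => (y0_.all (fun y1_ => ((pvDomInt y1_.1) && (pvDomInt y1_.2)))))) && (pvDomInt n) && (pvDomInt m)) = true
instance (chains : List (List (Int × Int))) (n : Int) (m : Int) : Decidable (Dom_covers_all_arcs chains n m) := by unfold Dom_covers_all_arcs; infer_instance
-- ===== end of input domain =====

-- B replaces A's O(n*m) enumeration of all grid adjacency arcs by counting the distinct
-- valid arcs found in the chains and comparing to the closed-form total (objective: faster).

-- ===== PORT A =====
def covers_all_arcs (chains : List (List (Int × Int))) (n : Int) (m : Int) : Bool :=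
  -- arcs: both directions of every consecutive chain pair
  let arcs : PySem.Set ((Int × Int) × (Int × Int)) :=
    chains.foldl (fun s chain =>
      (PySem.List.pyRange 0 ((chain.length : Int) - 1) 1).foldl (fun s i =>
        PySem.Set.add
          (PySem.Set.add s (PySem.List.pyGetD chain i (0, 0), PySem.List.pyGetD chain (i + 1) (0, 0)))
          (PySem.List.pyGetD chain (i + 1) (0, 0), PySem.List.pyGetD chain i (0, 0))) s)
      PySem.Set.empty
  -- all_arcs: every directed grid adjacency arc
  let all_arcs : PySem.Set ((Int × Int) × (Int × Int)) :=
    (PySem.List.pyRange 0 n 1).foldl (fun s i =>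
      (PySem.List.pyRange 0 m 1).foldl (fun s j =>
        ([((0 : Int), (1 : Int)), (1, 0), (0, -1), (-1, 0)]).foldl (fun s d =>
          if 0 ≤ i + d.1 ∧ i + d.1 < n ∧ 0 ≤ j + d.2 ∧ j + d.2 < m then
            PySem.Set.add s ((i, j), (i + d.1, j + d.2))
          else s) s) s)
      PySem.Set.empty
  PySem.Set.issubset all_arcs arcs

-- ===== PORT B =====
-- helper of B: is (a, b) a directed arc of the n × m grid?
def arcValid (n m : Int) (a b : Int × Int) : Bool :=
  decide (0 ≤ a.1 ∧ a.1 < n ∧ 0 ≤ a.2 ∧ a.2 < m ∧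
          0 ≤ b.1 ∧ b.1 < n ∧ 0 ≤ b.2 ∧ b.2 < m ∧
          |a.1 - b.1| + |a.2 - b.2| = 1)

def covers_all_arcs_alt (chains : List (List (Int × Int))) (n : Int) (m : Int) : Bool :=
  if n < 1 ∨ m < 1 then true
  else
    let covered : PySem.Set ((Int × Int) × (Int × Int)) :=
      chains.foldl (fun s chain =>
        (chain.zip (chain.drop 1)).foldl (fun s p =>
          if arcValid n m p.1 p.2 then
            PySem.Set.add (PySem.Set.add s p) (p.2, p.1)
          else s) s)
        PySem.Set.empty
    (covered.length : Int) == 2 * (n * (m - 1) + (n - 1) * m)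

-- ===== PRECONDITION & SPEC =====
def Spec_covers_all_arcs (chains : List (List (Int × Int))) (n : Int) (m : Int) (out : Bool) : Prop := out = covers_all_arcs_alt chains n m
instance (chains : List (List (Int × Int))) (n : Int) (m : Int) (out : Bool) : Decidable (Spec_covers_all_arcs chains n m out) := by unfold Spec_covers_all_arcs; infer_instance

-- ===== CLAIM (what is proved, stated in full; the proofs are below) =====
def Claim_equal_covers_all_arcs : Prop := ∀ (chains : List (List (Int × Int))) (n : Int) (m : Int), Dom_covers_all_arcs chains n m → Spec_covers_all_arcs chains n m (covers_all_arcs chains n m)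


-- ===== LEMMAS AND PROOFS =====

-- the directed grid-adjacency arcs (the membership predicate of A's all_arcs)
def Valid (n m : Int) (y : (Int × Int) × (Int × Int)) : Prop :=
  0 ≤ y.1.1 ∧ y.1.1 < n ∧ 0 ≤ y.1.2 ∧ y.1.2 < m ∧
  0 ≤ y.2.1 ∧ y.2.1 < n ∧ 0 ≤ y.2.2 ∧ y.2.2 < m ∧
  |y.1.1 - y.2.1| + |y.1.2 - y.2.2| = 1

-- the arcs contributed by the chains (shared membership predicate of A's arcs / B's covered)
def ArcP (chains : List (List (Int × Int))) (y : (Int × Int) × (Int × Int)) : Prop :=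
  ∃ c ∈ chains, ∃ b ∈ c.zip (c.drop 1), y = b ∨ y = (b.2, b.1)

-- generic fold characterizations
theorem mem_foldl_step {α β : Type} (l : List β) (step : List α → β → List α) (Q : β → α → Prop)
    (h : ∀ s c y, y ∈ step s c ↔ y ∈ s ∨ Q c y) :
    ∀ (s : List α) (y : α), y ∈ l.foldl step s ↔ y ∈ s ∨ ∃ c ∈ l, Q c y := by
  induction l with
  | nil => simp
  | cons c t ih =>
    intro s y
    simp only [List.foldl_cons, ih, h, List.mem_cons]
    constructor
    · rintro ((hy | hq) | ⟨c', hc', hq⟩)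
      · exact Or.inl hy
      · exact Or.inr ⟨c, Or.inl rfl, hq⟩
      · exact Or.inr ⟨c', Or.inr hc', hq⟩
    · rintro (hy | ⟨c', (rfl | hc'), hq⟩)
      · exact Or.inl (Or.inl hy)
      · exact Or.inl (Or.inr hq)
      · exact Or.inr ⟨c', hc', hq⟩

theorem nodup_foldl_step {α β : Type} (l : List β) (step : List α → β → List α)
    (h : ∀ s c, s.Nodup → (step s c).Nodup) :
    ∀ s : List α, s.Nodup → (l.foldl step s).Nodup := by
  induction l with
  | nil => intro s hs; simpa using hs
  | cons c t ih => intro s hs; exact ih _ (h s c hs)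


-- A's chain loop is indexed; B zips: they run over the same consecutive pairs
theorem chain_pairs (ch : List (Int × Int)) (y : (Int × Int) × (Int × Int)) :
    (∃ i, 0 ≤ i ∧ i < (ch.length : Int) - 1 ∧
      (y = (PySem.List.pyGetD ch i (0, 0), PySem.List.pyGetD ch (i + 1) (0, 0)) ∨
       y = (PySem.List.pyGetD ch (i + 1) (0, 0), PySem.List.pyGetD ch i (0, 0))))
    ↔ ∃ b ∈ ch.zip (ch.drop 1), y = b ∨ y = (b.2, b.1) := by
  constructor
  · rintro ⟨i, h0, h1, hy⟩
    have hk0 : i.toNat < ch.length := by omega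
    have hkk : i.toNat + 1 < ch.length := by omega
    have e1 : PySem.List.pyGetD ch i (0, 0) = ch[i.toNat] :=
      PySem.List.pyGetD_eq_getElem ch (0, 0) h0 (by omega)
    have e2 : PySem.List.pyGetD ch (i + 1) (0, 0) = ch[i.toNat + 1] := by
      rw [PySem.List.pyGetD_eq_getElem ch (0, 0) (by omega) (by omega)]
      congr 1
      omega
    have hz : i.toNat < (ch.zip (ch.drop 1)).length := by
      simp [List.length_zip]; omega
    refine ⟨(ch.zip (ch.drop 1))[i.toNat], List.getElem_mem hz, ?_⟩
    have hze : (ch.zip (ch.drop 1))[i.toNat] = (ch[i.toNat], ch[i.toNat + 1]) := by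
      rw [List.getElem_zip, List.getElem_drop]
      simp [Nat.add_comm]
    rw [hze]
    rcases hy with hy | hy
    · left; simp [hy, e1, e2]
    · right; simp [hy, e1, e2]
  · rintro ⟨b, hb, hy⟩
    obtain ⟨k, hk, rfl⟩ := List.mem_iff_getElem.mp hb
    have hkL : k + 1 < ch.length := by
      simp [List.length_zip] at hk; omega
    refine ⟨(k : Int), by omega, by simp [List.length_zip] at hk ⊢; omega, ?_⟩
    have e1 : PySem.List.pyGetD ch (k : Int) (0, 0) = ch[k] := by
      rw [PySem.List.pyGetD_eq_getElem ch (0, 0) (by omega) (by omega)]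
      congr 1
    have e2 : PySem.List.pyGetD ch ((k : Int) + 1) (0, 0) = ch[k + 1] := by
      rw [PySem.List.pyGetD_eq_getElem ch (0, 0) (by omega) (by omega)]
      congr 1
    have hze : (ch.zip (ch.drop 1))[k] = (ch[k], ch[k + 1]) := by
      rw [List.getElem_zip, List.getElem_drop]
      simp [Nat.add_comm]
    rw [hze] at hy
    rcases hy with hy | hy
    · left; simp [hy, e1, e2]
    · right; simp [hy, e1, e2]

-- membership in A's arcs set
theorem mem_arcs (chains : List (List (Int × Int))) (y : (Int × Int) × (Int × Int)) :
    y ∈ chains.foldl (fun s chain =>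
      (PySem.List.pyRange 0 ((chain.length : Int) - 1) 1).foldl (fun s i =>
        PySem.Set.add
          (PySem.Set.add s (PySem.List.pyGetD chain i (0, 0), PySem.List.pyGetD chain (i + 1) (0, 0)))
          (PySem.List.pyGetD chain (i + 1) (0, 0), PySem.List.pyGetD chain i (0, 0))) s)
      PySem.Set.empty ↔ ArcP chains y := by
  have hstep : ∀ (s : List ((Int × Int) × (Int × Int))) (chain : List (Int × Int)) (z : (Int × Int) × (Int × Int)),
      z ∈ (PySem.List.pyRange 0 ((chain.length : Int) - 1) 1).foldl (fun s i =>
        PySem.Set.add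
          (PySem.Set.add s (PySem.List.pyGetD chain i (0, 0), PySem.List.pyGetD chain (i + 1) (0, 0)))
          (PySem.List.pyGetD chain (i + 1) (0, 0), PySem.List.pyGetD chain i (0, 0))) s
      ↔ z ∈ s ∨ ∃ b ∈ chain.zip (chain.drop 1), z = b ∨ z = (b.2, b.1) := by
    intro s chain z
    rw [mem_foldl_step _ _
      (fun i z => z = (PySem.List.pyGetD chain i (0, 0), PySem.List.pyGetD chain (i + 1) (0, 0)) ∨
                  z = (PySem.List.pyGetD chain (i + 1) (0, 0), PySem.List.pyGetD chain i (0, 0)))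
      (by intro s i z; simp [PySem.Set.mem_add]; tauto) s z]
    rw [← chain_pairs chain z]
    simp only [PySem.List.mem_pyRange_one]
    apply or_congr_right
    apply exists_congr
    intro i
    tauto
  rw [mem_foldl_step _ _
    (fun chain z => ∃ b ∈ chain.zip (chain.drop 1), z = b ∨ z = (b.2, b.1)) hstep _ y]
  simp [ArcP, PySem.Set.empty]

-- arcValid decides Valid
theorem arcValid_iff (n m : Int) (a b : Int × Int) :
    arcValid n m a b = true ↔ Valid n m (a, b) := by
  simp [arcValid, Valid]

theorem Valid_swap (n m : Int) (a b : Int × Int) :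
    Valid n m (b, a) ↔ Valid n m (a, b) := by
  simp only [Valid]
  rw [abs_sub_comm b.1 a.1, abs_sub_comm b.2 a.2]
  tauto

-- membership in B's covered set
theorem mem_covered (chains : List (List (Int × Int))) (n m : Int) (y : (Int × Int) × (Int × Int)) :
    y ∈ chains.foldl (fun s chain =>
        (chain.zip (chain.drop 1)).foldl (fun s p =>
          if arcValid n m p.1 p.2 then
            PySem.Set.add (PySem.Set.add s p) (p.2, p.1)
          else s) s)
        PySem.Set.empty ↔ ArcP chains y ∧ Valid n m y := by
  have hstep : ∀ (s : List ((Int × Int) × (Int × Int))) (chain : List (Int × Int)) (z : (Int × Int) × (Int × Int)),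
      z ∈ (chain.zip (chain.drop 1)).foldl (fun s p =>
          if arcValid n m p.1 p.2 then
            PySem.Set.add (PySem.Set.add s p) (p.2, p.1)
          else s) s
      ↔ z ∈ s ∨ ∃ b ∈ chain.zip (chain.drop 1), arcValid n m b.1 b.2 = true ∧ (z = b ∨ z = (b.2, b.1)) := by
    intro s chain z
    rw [mem_foldl_step _ _
      (fun p z => arcValid n m p.1 p.2 = true ∧ (z = p ∨ z = (p.2, p.1)))
      (by intro s p z
          split_ifs with hv <;> simp [PySem.Set.mem_add, hv] <;> tauto) s z]
  rw [mem_foldl_step _ _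
    (fun chain z => ∃ b ∈ chain.zip (chain.drop 1), arcValid n m b.1 b.2 = true ∧ (z = b ∨ z = (b.2, b.1)))
    hstep _ y]
  simp only [PySem.Set.empty, List.not_mem_nil, false_or, ArcP]
  constructor
  · rintro ⟨ch, hc, b, hb, hv, hy⟩
    refine ⟨⟨ch, hc, b, hb, hy⟩, ?_⟩
    rcases hy with rfl | rfl
    · exact (arcValid_iff _ _ _ _).mp hv
    · exact (Valid_swap _ _ _ _).mpr ((arcValid_iff _ _ _ _).mp hv)
  · rintro ⟨⟨ch, hc, b, hb, hy⟩, hv⟩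
    refine ⟨ch, hc, b, hb, ?_, hy⟩
    rw [arcValid_iff]
    rcases hy with rfl | rfl
    · exact hv
    · exact (Valid_swap _ _ _ _).mp hv

theorem nodup_covered (chains : List (List (Int × Int))) (n m : Int) :
    (chains.foldl (fun s chain =>
        (chain.zip (chain.drop 1)).foldl (fun s p =>
          if arcValid n m p.1 p.2 then
            PySem.Set.add (PySem.Set.add s p) (p.2, p.1)
          else s) s)
        PySem.Set.empty).Nodup := by
  refine nodup_foldl_step _ _ ?_ _ (by simp [PySem.Set.empty])
  intro s ch hs
  refine nodup_foldl_step _ _ ?_ _ hs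
  intro s p hp
  split_ifs
  · exact PySem.Set.nodup_add _ _ (PySem.Set.nodup_add _ _ hp)
  · exact hp

-- membership in A's all_arcs set
theorem mem_allarcs (n m : Int) (y : (Int × Int) × (Int × Int)) :
    y ∈ (PySem.List.pyRange 0 n 1).foldl (fun s i =>
      (PySem.List.pyRange 0 m 1).foldl (fun s j =>
        ([((0 : Int), (1 : Int)), (1, 0), (0, -1), (-1, 0)]).foldl (fun s d =>
          if 0 ≤ i + d.1 ∧ i + d.1 < n ∧ 0 ≤ j + d.2 ∧ j + d.2 < m then
            PySem.Set.add s ((i, j), (i + d.1, j + d.2))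
          else s) s) s)
      PySem.Set.empty ↔ Valid n m y := by
  have hstep3 : ∀ (i j : Int) (s : List ((Int × Int) × (Int × Int))) (z : (Int × Int) × (Int × Int)),
      z ∈ ([((0 : Int), (1 : Int)), (1, 0), (0, -1), (-1, 0)]).foldl (fun s d =>
          if 0 ≤ i + d.1 ∧ i + d.1 < n ∧ 0 ≤ j + d.2 ∧ j + d.2 < m then
            PySem.Set.add s ((i, j), (i + d.1, j + d.2))
          else s) s
      ↔ z ∈ s ∨ ∃ d ∈ [((0 : Int), (1 : Int)), (1, 0), (0, -1), (-1, 0)],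
          (0 ≤ i + d.1 ∧ i + d.1 < n ∧ 0 ≤ j + d.2 ∧ j + d.2 < m) ∧ z = ((i, j), (i + d.1, j + d.2)) := by
    intro i j s z
    rw [mem_foldl_step _ _
      (fun d z => (0 ≤ i + d.1 ∧ i + d.1 < n ∧ 0 ≤ j + d.2 ∧ j + d.2 < m) ∧ z = ((i, j), (i + d.1, j + d.2)))
      (by intro s d z
          split_ifs with hc
          · simp [PySem.Set.mem_add, hc]
          · simp [hc]) s z]
  have hstep2 : ∀ (i : Int) (s : List ((Int × Int) × (Int × Int))) (z : (Int × Int) × (Int × Int)),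
      z ∈ (PySem.List.pyRange 0 m 1).foldl (fun s j =>
        ([((0 : Int), (1 : Int)), (1, 0), (0, -1), (-1, 0)]).foldl (fun s d =>
          if 0 ≤ i + d.1 ∧ i + d.1 < n ∧ 0 ≤ j + d.2 ∧ j + d.2 < m then
            PySem.Set.add s ((i, j), (i + d.1, j + d.2))
          else s) s) s
      ↔ z ∈ s ∨ ∃ j, (0 ≤ j ∧ j < m) ∧ ∃ d ∈ [((0 : Int), (1 : Int)), (1, 0), (0, -1), (-1, 0)],
          (0 ≤ i + d.1 ∧ i + d.1 < n ∧ 0 ≤ j + d.2 ∧ j + d.2 < m) ∧ z = ((i, j), (i + d.1, j + d.2)) := by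
    intro i s z
    rw [mem_foldl_step _ _
      (fun j z => ∃ d ∈ [((0 : Int), (1 : Int)), (1, 0), (0, -1), (-1, 0)],
          (0 ≤ i + d.1 ∧ i + d.1 < n ∧ 0 ≤ j + d.2 ∧ j + d.2 < m) ∧ z = ((i, j), (i + d.1, j + d.2)))
      (fun s j z => hstep3 i j s z) s z]
    simp only [PySem.List.mem_pyRange_one]
  rw [mem_foldl_step _ _
    (fun i z => ∃ j, (0 ≤ j ∧ j < m) ∧ ∃ d ∈ [((0 : Int), (1 : Int)), (1, 0), (0, -1), (-1, 0)],
        (0 ≤ i + d.1 ∧ i + d.1 < n ∧ 0 ≤ j + d.2 ∧ j + d.2 < m) ∧ z = ((i, j), (i + d.1, j + d.2)))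
    (fun s i z => hstep2 i s z) _ y]
  simp only [PySem.List.mem_pyRange_one, PySem.Set.empty, List.not_mem_nil, false_or,
    List.mem_cons, List.not_mem_nil, or_false]
  constructor
  · rintro ⟨i, ⟨hi0, hin⟩, j, ⟨hj0, hjm⟩, d, hd, ⟨hb1, hb2, hb3, hb4⟩, rfl⟩
    rcases hd with rfl | rfl | rfl | rfl <;>
      refine ⟨by simpa using hi0, by simpa using hin, by simpa using hj0, by simpa using hjm,
        by simpa using hb1, by simpa using hb2, by simpa using hb3, by simpa using hb4, ?_⟩ <;>
      simp
  · rintro ⟨h1, h2, h3, h4, h5, h6, h7, h8, habs⟩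
    refine ⟨y.1.1, ⟨h1, h2⟩, y.1.2, ⟨h3, h4⟩, ?_⟩
    have hc : (y.2.1 = y.1.1 ∧ y.2.2 = y.1.2 + 1) ∨ (y.2.1 = y.1.1 + 1 ∧ y.2.2 = y.1.2) ∨
              (y.2.1 = y.1.1 ∧ y.2.2 = y.1.2 - 1) ∨ (y.2.1 = y.1.1 - 1 ∧ y.2.2 = y.1.2) := by
      rcases abs_cases (y.1.1 - y.2.1) with ⟨e1, _⟩ | ⟨e1, _⟩ <;>
        rcases abs_cases (y.1.2 - y.2.2) with ⟨e2, _⟩ | ⟨e2, _⟩ <;> omega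
    rcases hc with ⟨hc1, hc2⟩ | ⟨hc1, hc2⟩ | ⟨hc1, hc2⟩ | ⟨hc1, hc2⟩
    · exact ⟨(0, 1), by simp, ⟨by omega, by omega, by omega, by omega⟩, by
        rw [show (y.1.1 + 0, y.1.2 + 1) = y.2 from by rw [Prod.ext_iff]; constructor <;> simp <;> omega]⟩
    · exact ⟨(1, 0), by simp, ⟨by omega, by omega, by omega, by omega⟩, by
        rw [show (y.1.1 + 1, y.1.2 + 0) = y.2 from by rw [Prod.ext_iff]; constructor <;> simp <;> omega]⟩
    · exact ⟨(0, -1), by simp, ⟨by omega, by omega, by omega, by omega⟩, by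
        rw [show (y.1.1 + 0, y.1.2 + -1) = y.2 from by rw [Prod.ext_iff]; constructor <;> simp <;> omega]⟩
    · exact ⟨(-1, 0), by simp, ⟨by omega, by omega, by omega, by omega⟩, by
        rw [show (y.1.1 + -1, y.1.2 + 0) = y.2 from by rw [Prod.ext_iff]; constructor <;> simp <;> omega]⟩

-- canonical duplicate-free enumeration of the valid arcs, for counting
def Vlist (n m : Int) : List ((Int × Int) × (Int × Int)) :=
  ((PySem.List.pyRange 0 n 1).flatMap fun i =>
      (PySem.List.pyRange 0 (m - 1) 1).map fun j => ((i, j), (i, j + 1)))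
  ++ ((PySem.List.pyRange 0 n 1).flatMap fun i =>
      (PySem.List.pyRange 0 (m - 1) 1).map fun j => ((i, j + 1), (i, j)))
  ++ ((PySem.List.pyRange 0 (n - 1) 1).flatMap fun i =>
      (PySem.List.pyRange 0 m 1).map fun j => ((i, j), (i + 1, j)))
  ++ ((PySem.List.pyRange 0 (n - 1) 1).flatMap fun i =>
      (PySem.List.pyRange 0 m 1).map fun j => ((i + 1, j), (i, j)))

theorem mem_Vlist (n m : Int) (y : (Int × Int) × (Int × Int)) :
    y ∈ Vlist n m ↔ Valid n m y := by
  simp only [Vlist, List.mem_append, List.mem_flatMap, List.mem_map,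
    PySem.List.mem_pyRange_one, Valid]
  constructor
  · rintro (((⟨i, hi, j, hj, rfl⟩ | ⟨i, hi, j, hj, rfl⟩) | ⟨i, hi, j, hj, rfl⟩) | ⟨i, hi, j, hj, rfl⟩) <;>
      refine ⟨?_, ?_, ?_, ?_, ?_, ?_, ?_, ?_, ?_⟩ <;>
      simp <;>
      omega
  · rintro ⟨h1, h2, h3, h4, h5, h6, h7, h8, habs⟩
    have hc : (y.2.1 = y.1.1 ∧ y.2.2 = y.1.2 + 1) ∨ (y.2.1 = y.1.1 + 1 ∧ y.2.2 = y.1.2) ∨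
              (y.2.1 = y.1.1 ∧ y.2.2 = y.1.2 - 1) ∨ (y.2.1 = y.1.1 - 1 ∧ y.2.2 = y.1.2) := by
      rcases abs_cases (y.1.1 - y.2.1) with ⟨e1, _⟩ | ⟨e1, _⟩ <;>
        rcases abs_cases (y.1.2 - y.2.2) with ⟨e2, _⟩ | ⟨e2, _⟩ <;> omega
    rcases hc with ⟨hc1, hc2⟩ | ⟨hc1, hc2⟩ | ⟨hc1, hc2⟩ | ⟨hc1, hc2⟩
    · exact Or.inl (Or.inl (Or.inl ⟨y.1.1, by omega, y.1.2, by omega, by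
        rw [Prod.ext_iff, Prod.ext_iff, Prod.ext_iff]; simp; omega⟩))
    · exact Or.inl (Or.inr ⟨y.1.1, by omega, y.1.2, by omega, by
        rw [Prod.ext_iff, Prod.ext_iff, Prod.ext_iff]; simp; omega⟩)
    · exact Or.inl (Or.inl (Or.inr ⟨y.1.1, by omega, y.2.2, by omega, by
        rw [Prod.ext_iff, Prod.ext_iff, Prod.ext_iff]; simp; omega⟩))
    · exact Or.inr ⟨y.2.1, by omega, y.1.2, by omega, by
        rw [Prod.ext_iff, Prod.ext_iff, Prod.ext_iff]; simp; omega⟩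

theorem nodup_Vlist (n m : Int) : (Vlist n m).Nodup := by
  have hblock : ∀ (a b : Int) (f : Int → Int → (Int × Int) × (Int × Int))
      (hinj : ∀ i j i' j', f i j = f i' j' → i = i' ∧ j = j'),
      ((PySem.List.pyRange 0 a 1).flatMap fun i =>
        (PySem.List.pyRange 0 b 1).map fun j => f i j).Nodup := by
    intro a b f hinj
    rw [List.nodup_flatMap]
    constructor
    · intro i _
      exact (PySem.List.nodup_pyRange_one 0 b).map
        (fun {j j'} h => (hinj i j i j' h).2)
    · refine List.Pairwise.imp ?_ ((PySem.List.nodup_pyRange_one 0 a))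
      intro i i' hne z hz hz'
      simp only [List.mem_map] at hz hz'
      obtain ⟨j, _, rfl⟩ := hz
      obtain ⟨j', _, he⟩ := hz'
      exact hne ((hinj i' j' i j he).1.symm)
  have d1 := hblock n (m - 1) (fun i j => ((i, j), (i, j + 1)))
    (by intro i j i' j' h; rw [Prod.ext_iff, Prod.ext_iff, Prod.ext_iff] at h; simp at h; omega)
  have d2 := hblock n (m - 1) (fun i j => ((i, j + 1), (i, j)))
    (by intro i j i' j' h; rw [Prod.ext_iff, Prod.ext_iff, Prod.ext_iff] at h; simp at h; omega)
  have d3 := hblock (n - 1) m (fun i j => ((i, j), (i + 1, j)))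
    (by intro i j i' j' h; rw [Prod.ext_iff, Prod.ext_iff, Prod.ext_iff] at h; simp at h; omega)
  have d4 := hblock (n - 1) m (fun i j => ((i + 1, j), (i, j)))
    (by intro i j i' j' h; rw [Prod.ext_iff, Prod.ext_iff, Prod.ext_iff] at h; simp at h; omega)
  have hshape : ∀ z ∈ ((PySem.List.pyRange 0 n 1).flatMap fun i =>
      (PySem.List.pyRange 0 (m - 1) 1).map fun j => ((i, j), (i, j + 1))),
      z.1.1 = z.2.1 ∧ z.2.2 = z.1.2 + 1 := by
    simp only [List.mem_flatMap, List.mem_map]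
    rintro z ⟨i, _, j, _, rfl⟩; simp
  have hshape2 : ∀ z ∈ ((PySem.List.pyRange 0 n 1).flatMap fun i =>
      (PySem.List.pyRange 0 (m - 1) 1).map fun j => ((i, j + 1), (i, j))),
      z.1.1 = z.2.1 ∧ z.1.2 = z.2.2 + 1 := by
    simp only [List.mem_flatMap, List.mem_map]
    rintro z ⟨i, _, j, _, rfl⟩; simp
  have hshape3 : ∀ z ∈ ((PySem.List.pyRange 0 (n - 1) 1).flatMap fun i =>
      (PySem.List.pyRange 0 m 1).map fun j => ((i, j), (i + 1, j))),
      z.2.1 = z.1.1 + 1 ∧ z.1.2 = z.2.2 := by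
    simp only [List.mem_flatMap, List.mem_map]
    rintro z ⟨i, _, j, _, rfl⟩; simp
  have hshape4 : ∀ z ∈ ((PySem.List.pyRange 0 (n - 1) 1).flatMap fun i =>
      (PySem.List.pyRange 0 m 1).map fun j => ((i + 1, j), (i, j))),
      z.1.1 = z.2.1 + 1 ∧ z.1.2 = z.2.2 := by
    simp only [List.mem_flatMap, List.mem_map]
    rintro z ⟨i, _, j, _, rfl⟩; simp
  rw [Vlist, List.nodup_append, List.nodup_append, List.nodup_append]
  refine ⟨⟨⟨d1, d2, ?_⟩, d3, ?_⟩, d4, ?_⟩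
  · intro z hz w hw heq
    subst heq
    have s1 := hshape z hz
    have s2 := hshape2 z hw
    omega
  · intro z hz w hw heq
    subst heq
    have s3 := hshape3 z hw
    rw [List.mem_append] at hz
    rcases hz with hz | hz
    · have := hshape z hz; omega
    · have := hshape2 z hz; omega
  · intro z hz w hw heq
    subst heq
    have s4 := hshape4 z hw
    rw [List.mem_append, List.mem_append] at hz
    rcases hz with (hz | hz) | hz
    · have := hshape z hz; omega
    · have := hshape2 z hz; omega
    · have := hshape3 z hz; omega

theorem length_Vlist (n m : Int) (hn : 1 ≤ n) (hm : 1 ≤ m) :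
    ((Vlist n m).length : Int) = 2 * (n * (m - 1) + (n - 1) * m) := by
  have hlen : ∀ (a b : Int) (f : Int → Int → (Int × Int) × (Int × Int)),
      (((PySem.List.pyRange 0 a 1).flatMap fun i =>
        (PySem.List.pyRange 0 b 1).map fun j => f i j).length) = a.toNat * b.toNat := by
    intro a b f
    rw [List.length_flatMap]
    have : ∀ i : Int, ((PySem.List.pyRange 0 b 1).map fun j => f i j).length = b.toNat := by
      intro i
      rw [List.length_map, PySem.List.length_pyRange_one]
      simp
    simp only [this]
    rw [List.map_const', List.sum_replicate, PySem.List.length_pyRange_one, smul_eq_mul]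
    simp
  rw [Vlist]
  simp only [List.length_append, hlen]
  have e1 : (n.toNat : Int) = n := Int.toNat_of_nonneg (by omega)
  have e2 : ((m - 1).toNat : Int) = m - 1 := Int.toNat_of_nonneg (by omega)
  have e3 : ((n - 1).toNat : Int) = n - 1 := Int.toNat_of_nonneg (by omega)
  have e4 : (m.toNat : Int) = m := Int.toNat_of_nonneg (by omega)
  push_cast
  rw [e1, e2, e3, e4]
  ring

-- a duplicate-free sublist of a duplicate-free list is everything iff the lengths agree
theorem length_eq_iff_superset {α : Type} (cs vs : List α) (hc : cs.Nodup) (hv : vs.Nodup)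
    (hsub : ∀ y ∈ cs, y ∈ vs) : cs.length = vs.length ↔ ∀ y ∈ vs, y ∈ cs := by
  constructor
  · intro hlen
    obtain ⟨l, hp, hs⟩ := hc.subperm hsub
    have : l = vs := hs.eq_of_length (by rw [hp.length_eq, hlen])
    subst this
    intro y hy
    exact hp.mem_iff.mp hy
  · intro hsup
    exact ((List.perm_ext_iff_of_nodup hc hv).mpr (fun a => ⟨hsub a, hsup a⟩)).length_eq

-- ===== VERDICT (by name: the statement is the Claim_ definition above) =====
theorem covers_all_arcs_spec : Claim_equal_covers_all_arcs := by
  intro chains n m _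
  unfold Spec_covers_all_arcs
  by_cases hcase : n < 1 ∨ m < 1
  · have hB : covers_all_arcs_alt chains n m = true := by
      unfold covers_all_arcs_alt
      rw [if_pos hcase]
    rw [hB]
    unfold covers_all_arcs
    show PySem.Set.issubset _ _ = true
    apply (PySem.Set.issubset_iff _ _).mpr
    intro x hx
    have hv := (mem_allarcs n m x).mp hx
    rw [Valid] at hv
    omega
  · obtain ⟨hn, hm⟩ : 1 ≤ n ∧ 1 ≤ m := by omega
    have hA : covers_all_arcs chains n m = true ↔ (∀ y, Valid n m y → ArcP chains y) := by
      unfold covers_all_arcs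
      show PySem.Set.issubset _ _ = true ↔ _
      rw [PySem.Set.issubset_iff]
      constructor
      · intro hsub y hy
        exact (mem_arcs chains y).mp (hsub y ((mem_allarcs n m y).mpr hy))
      · intro hcov x hx
        exact (mem_arcs chains x).mpr (hcov x ((mem_allarcs n m x).mp hx))
    have hB : covers_all_arcs_alt chains n m = true ↔ (∀ y, Valid n m y → ArcP chains y) := by
      unfold covers_all_arcs_alt
      rw [if_neg (by omega : ¬(n < 1 ∨ m < 1))]
      show ((((chains.foldl (fun s chain =>
          (chain.zip (chain.drop 1)).foldl (fun s p =>
            if arcValid n m p.1 p.2 then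
              PySem.Set.add (PySem.Set.add s p) (p.2, p.1)
            else s) s)
          PySem.Set.empty).length : Int)) == 2 * (n * (m - 1) + (n - 1) * m)) = true ↔ _
      rw [beq_iff_eq]
      have hnodup := nodup_covered chains n m
      have hmem := mem_covered chains n m
      have hsub : ∀ y ∈ chains.foldl (fun s chain =>
          (chain.zip (chain.drop 1)).foldl (fun s p =>
            if arcValid n m p.1 p.2 then
              PySem.Set.add (PySem.Set.add s p) (p.2, p.1)
            else s) s)
          PySem.Set.empty, y ∈ Vlist n m :=
        fun y hy => (mem_Vlist n m y).mpr ((hmem y).mp hy).2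
      have hlen := length_eq_iff_superset _ _ hnodup (nodup_Vlist n m) hsub
      have hVlen := length_Vlist n m hn hm
      constructor
      · intro hEq y hy
        have hleq : (chains.foldl (fun s chain =>
            (chain.zip (chain.drop 1)).foldl (fun s p =>
              if arcValid n m p.1 p.2 then
                PySem.Set.add (PySem.Set.add s p) (p.2, p.1)
              else s) s)
            PySem.Set.empty).length = (Vlist n m).length := by omega
        have hsup := hlen.mp hleq
        exact ((hmem y).mp (hsup y ((mem_Vlist n m y).mpr hy))).1
      · intro hcov
        have hsup : ∀ y ∈ Vlist n m, y ∈ chains.foldl (fun s chain =>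
            (chain.zip (chain.drop 1)).foldl (fun s p =>
              if arcValid n m p.1 p.2 then
                PySem.Set.add (PySem.Set.add s p) (p.2, p.1)
              else s) s)
            PySem.Set.empty :=
          fun y hy => (hmem y).mpr ⟨hcov y ((mem_Vlist n m y).mp hy), (mem_Vlist n m y).mp hy⟩
        rw [hlen.mpr hsup]
        exact hVlen
    rw [Bool.eq_iff_iff, hA, hB]
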